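-- pv_equiv track=rewrite | github.com/ODS-NN-Breakfasts/rus-ad-search-engine | research/metrics.py | confusion_matrix_micro
-- ===== SOURCE A (Python) =====
-- def confusion_matrix_micro(mapping, predictions, n_ads, n_requests):
--     """
--     Counts micro-averaged True Positive, False Positive, True Negative, False Negative metrics.
--     :param mapping: result of dataset_tools.utils.load_matching_data
--     :param predictions: in the same format as mapping
--     :param n_ads: amount of ads in ads_db.txt
--     :param n_requests: amount of requests in requests_db.txt
--     :return: dict of metrics
--     """
--     micro_metrics = {"TP": 0,
--                      "FP": 0,
--                      "TN": 0,
--                      "FN": 0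
--                      }
--
--     for request_i in range(1, n_requests + 1):
--         request_i = str(request_i)
--
--         # NO MAPPING, NO PREDICTIONS
--         if (request_i not in mapping) and (request_i not in predictions):
--             TN = n_ads
--             micro_metrics["TN"] += TN
--
--         # MAPPING, NO PREDICTIONS
--         elif (request_i in mapping) and (request_i not in predictions):
--             FN = len(mapping[request_i])  # only negatives are present
--             TN = n_ads - FN
--             micro_metrics["FN"] += FN
--             micro_metrics["TN"] += TN
--
--         # PREDICTIONS, NO MAPPING
--         elif (request_i not in mapping) and (request_i in predictions):
--             FP = len(predictions[request_i])  # only positives are present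
--             TN = n_ads - FP
--             micro_metrics["FP"] += FP
--             micro_metrics["TN"] += TN
--
--         # MAPPING, PREDICTIONS
--         else:
--             mapping_indices = mapping[request_i]
--             prediction_indices = predictions[request_i]
--             TP, FP, TN, FN = 0, 0, 0, 0
--
--             for prediction_i in range(1, n_ads + 1):
--                 prediction_i = str(prediction_i)
--
--                 # INDEX IS ABSENT BOTH IN MAPPING AND IN PREDICTIONS
--                 if (prediction_i not in mapping_indices) and (prediction_i not in prediction_indices):
--                     TN += 1
--
--                 # INDEX IS PRESNT IN MAPPING AND ABSENT IN PREDICTIONS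
--                 elif (prediction_i in mapping_indices) and (prediction_i not in prediction_indices):
--                     FN += 1
--
--                 # INDEX IS PRESNT IN PREDICTIONS AND ABSENT IN MAPPING
--                 elif (prediction_i not in mapping_indices) and (prediction_i in prediction_indices):
--                     FP += 1
--
--                 # INDEX IS PRESENT BOTH IN MAPPING AND IN PREDICTIONS
--                 else:
--                     TP += 1
--
--             micro_metrics["TP"] += TP
--             micro_metrics["FP"] += FP
--             micro_metrics["TN"] += TN
--             micro_metrics["FN"] += FN
--
--     return micro_metrics
-- ===== SOURCE B (Python) =====
-- def confusion_matrix_micro(mapping, predictions, n_ads, n_requests):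
--     """
--     Counts micro-averaged True Positive, False Positive, True Negative, False Negative metrics.
--     Set-based: the universe of ad-id strings is built once, on the first request that has both
--     a mapping and predictions; TP/FP/FN are then set intersection/difference sizes per such
--     request and TN comes by subtraction from n_ads.
--     """
--     ad_ids = None  # built lazily: only requests present in both dicts need it
--
--     tp = fp = tn = fn = 0
--     for r in map(str, range(1, n_requests + 1)):
--         m = mapping.get(r)
--         p = predictions.get(r)
--         if m is None and p is None:
--             tn += n_ads
--         elif p is None:
--             fn += len(m)
--             tn += n_ads - len(m)
--         elif m is None:
--             fp += len(p)
--             tn += n_ads - len(p)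
--         else:
--             if ad_ids is None:
--                 ad_ids = set(map(str, range(1, n_ads + 1)))
--             ms = set(m) & ad_ids
--             ps = set(p) & ad_ids
--             tp += len(ms & ps)
--             fn += len(ms - ps)
--             fp += len(ps - ms)
--             tn += n_ads - len(ms | ps)
--
--     return {"TP": tp, "FP": fp, "TN": tn, "FN": fn}
-- ===== Notes on version B (the rewrite author's own statement) =====
-- stated objective: alternative
-- what changed: For each request matched in both dicts, A scans every ad id 1..n_ads testing list membership; B builds the set of ad-id strings once (lazily, on the first such request) and reads TP/FN/FP off set intersection/difference sizes, getting TN by subtraction from n_ads. Pre_ excludes negative n_ads, where an ad COUNT is meaningless and A's empty inner loop adds 0 to TN while B's subtraction adds n_ads.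
import Mathlib
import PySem

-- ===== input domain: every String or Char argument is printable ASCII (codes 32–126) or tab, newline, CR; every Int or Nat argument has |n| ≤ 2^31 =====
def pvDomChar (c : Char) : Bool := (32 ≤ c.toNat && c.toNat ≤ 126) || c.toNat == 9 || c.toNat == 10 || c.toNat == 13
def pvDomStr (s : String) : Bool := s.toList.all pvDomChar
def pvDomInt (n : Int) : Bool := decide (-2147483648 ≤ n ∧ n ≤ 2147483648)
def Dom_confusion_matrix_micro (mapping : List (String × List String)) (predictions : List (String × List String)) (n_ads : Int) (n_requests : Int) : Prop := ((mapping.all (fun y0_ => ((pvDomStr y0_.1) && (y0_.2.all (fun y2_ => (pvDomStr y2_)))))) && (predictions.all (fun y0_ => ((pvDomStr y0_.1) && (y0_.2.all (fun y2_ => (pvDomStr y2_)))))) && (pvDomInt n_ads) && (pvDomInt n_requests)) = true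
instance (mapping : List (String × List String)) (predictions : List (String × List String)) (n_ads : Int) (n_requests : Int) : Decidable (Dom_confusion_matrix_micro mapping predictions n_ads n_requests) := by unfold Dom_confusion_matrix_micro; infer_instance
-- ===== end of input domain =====

-- B replaces A's per-request scan over all n_ads ad ids by one set of ad-id strings built
-- once plus per-request set intersection/difference sizes, computing TN by subtraction from n_ads.


-- ===== PORT A =====
-- inner loop of A's MAPPING-AND-PREDICTIONS branch: scan ad ids 1..n_ads, accumulator (TP, FP, TN, FN)
def cmInnerA (mi pi : List String) (n_ads : Int) : Int × Int × Int × Int :=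
  (PySem.List.pyRange 1 (n_ads + 1) 1).foldl (fun acc i =>
      let s := PySem.Int.toStr i
      let inM := mi.contains s
      let inP := pi.contains s
      if !inM && !inP then (acc.1, acc.2.1, acc.2.2.1 + 1, acc.2.2.2)
      else if inM && !inP then (acc.1, acc.2.1, acc.2.2.1, acc.2.2.2 + 1)
      else if !inM && inP then (acc.1, acc.2.1 + 1, acc.2.2.1, acc.2.2.2)
      else (acc.1 + 1, acc.2.1, acc.2.2.1, acc.2.2.2))
    (0, 0, 0, 0)

def confusion_matrix_micro (mapping : List (String × List String)) (predictions : List (String × List String)) (n_ads : Int) (n_requests : Int) : List (String × Int) :=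
  -- micro_metrics dict carried as the quadruple (TP, FP, TN, FN); keys are the four fixed literals
  let res := (PySem.List.pyRange 1 (n_requests + 1) 1).foldl (fun (acc : Int × Int × Int × Int) i =>
      let r := PySem.Int.toStr i
      let inM := PySem.Dict.contains ⟨mapping⟩ r
      let inP := PySem.Dict.contains ⟨predictions⟩ r
      if !inM && !inP then
        (acc.1, acc.2.1, acc.2.2.1 + n_ads, acc.2.2.2)
      else if inM && !inP then
        let FN : Int := (PySem.Dict.getD ⟨mapping⟩ r []).length   -- mapping[r]: guarded by inM
        (acc.1, acc.2.1, acc.2.2.1 + (n_ads - FN), acc.2.2.2 + FN)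
      else if !inM && inP then
        let FP : Int := (PySem.Dict.getD ⟨predictions⟩ r []).length
        (acc.1, acc.2.1 + FP, acc.2.2.1 + (n_ads - FP), acc.2.2.2)
      else
        let t := cmInnerA (PySem.Dict.getD ⟨mapping⟩ r []) (PySem.Dict.getD ⟨predictions⟩ r []) n_ads
        (acc.1 + t.1, acc.2.1 + t.2.1, acc.2.2.1 + t.2.2.1, acc.2.2.2 + t.2.2.2))
    (0, 0, 0, 0)
  [("TP", res.1), ("FP", res.2.1), ("TN", res.2.2.1), ("FN", res.2.2.2)]

-- ===== PORT B =====
def confusion_matrix_micro_alt (mapping : List (String × List String)) (predictions : List (String × List String)) (n_ads : Int) (n_requests : Int) : List (String × Int) :=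
  let res := (PySem.List.pyRange 1 (n_requests + 1) 1).foldl (fun (acc : Int × Int × Int × Int) i =>
      let r := PySem.Int.toStr i
      match PySem.Dict.get? ⟨mapping⟩ r, PySem.Dict.get? ⟨predictions⟩ r with
      | none, none => (acc.1, acc.2.1, acc.2.2.1 + n_ads, acc.2.2.2)
      | some m, none => (acc.1, acc.2.1, acc.2.2.1 + (n_ads - m.length), acc.2.2.2 + m.length)
      | none, some p => (acc.1, acc.2.1 + p.length, acc.2.2.1 + (n_ads - p.length), acc.2.2.2)
      | some m, some p =>
        -- ad_ids = set(map(str, range(1, n_ads + 1))): Source B memoizes it on first use;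
        -- the cache is value-invisible, so the pure port recomputes the same set here
        let adIds : PySem.Set String := PySem.Set.ofList ((PySem.List.pyRange 1 (n_ads + 1) 1).map PySem.Int.toStr)
        let ms := PySem.Set.inter (PySem.Set.ofList m) adIds
        let ps := PySem.Set.inter (PySem.Set.ofList p) adIds
        (acc.1 + PySem.Set.len (PySem.Set.inter ms ps),
         acc.2.1 + PySem.Set.len (PySem.Set.diff ps ms),
         acc.2.2.1 + (n_ads - PySem.Set.len (PySem.Set.union ms ps)),
         acc.2.2.2 + PySem.Set.len (PySem.Set.diff ms ps)))
    (0, 0, 0, 0)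
  [("TP", res.1), ("FP", res.2.1), ("TN", res.2.2.1), ("FN", res.2.2.2)]

-- ===== PRECONDITION & SPEC =====
-- Pre_ restricts to the natural domain of an ad COUNT: 0 ≤ n_ads. For a negative n_ads
-- (on which A still returns) A's per-ad loop is empty, so the matched-request branch adds 0 to TN,
-- while B's subtraction-based TN adds n_ads there.
def Pre_confusion_matrix_micro (mapping : List (String × List String)) (predictions : List (String × List String)) (n_ads : Int) (n_requests : Int) : Prop := 0 ≤ n_ads
instance (mapping : List (String × List String)) (predictions : List (String × List String)) (n_ads : Int) (n_requests : Int) : Decidable (Pre_confusion_matrix_micro mapping predictions n_ads n_requests) := by unfold Pre_confusion_matrix_micro; infer_instance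

def pvWitness_confusion_matrix_micro : (List (String × List String)) × (List (String × List String)) × Int × Int :=
  ([("1", ["1", "2"])], [("1", ["2", "3"]), ("2", ["1"])], 3, 2)

def Spec_confusion_matrix_micro (mapping : List (String × List String)) (predictions : List (String × List String)) (n_ads : Int) (n_requests : Int) (out : List (String × Int)) : Prop := out = confusion_matrix_micro_alt mapping predictions n_ads n_requests
instance (mapping : List (String × List String)) (predictions : List (String × List String)) (n_ads : Int) (n_requests : Int) (out : List (String × Int)) : Decidable (Spec_confusion_matrix_micro mapping predictions n_ads n_requests out) := by unfold Spec_confusion_matrix_micro; infer_instance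

-- ===== CLAIM (what is proved, stated in full; the proofs are below) =====
def Claim_equal_confusion_matrix_micro : Prop := ∀ (mapping : List (String × List String)) (predictions : List (String × List String)) (n_ads : Int) (n_requests : Int), Dom_confusion_matrix_micro mapping predictions n_ads n_requests → Pre_confusion_matrix_micro mapping predictions n_ads n_requests → Spec_confusion_matrix_micro mapping predictions n_ads n_requests (confusion_matrix_micro mapping predictions n_ads n_requests)

-- ===== LEMMAS AND PROOFS =====

-- ---------- str(i) is injective on positive i (via the decimal value of the digit string) ----------
def dstep (a : Nat) (c : Char) : Nat := 10 * a + (c.toNat - 48)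
def decv (cs : List Char) : Nat := cs.foldl dstep 0

theorem digitChar_toNat {d : Nat} (h : d < 10) : (Nat.digitChar d).toNat = 48 + d := by
  interval_cases d <;> decide

theorem toDigitsCore_decv (f : Nat) : ∀ (n : Nat) (ds : List Char), n < 10 ^ f →
    (Nat.toDigitsCore 10 f n ds).foldl dstep 0 = ds.foldl dstep n := by
  induction f with
  | zero =>
    intro n ds h
    have hn : n = 0 := by simpa using Nat.lt_one_iff.mp (by simpa using h)
    subst hn
    simp [Nat.toDigitsCore]
  | succ f ih =>
    intro n ds h
    simp only [Nat.toDigitsCore]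
    have hmod : n % 10 < 10 := Nat.mod_lt _ (by norm_num)
    by_cases hdiv : n / 10 = 0
    · have hn10 : n < 10 := by omega
      simp only [hdiv, if_true]
      simp only [List.foldl_cons]
      have : dstep 0 (Nat.digitChar (n % 10)) = n % 10 := by
        simp [dstep, digitChar_toNat hmod]
      rw [this, Nat.mod_eq_of_lt hn10]
    · simp only [hdiv, if_false]
      have hlt : n / 10 < 10 ^ f := by
        have h10 : (0:Nat) < 10 := by norm_num
        rw [Nat.div_lt_iff_lt_mul h10]
        calc n < 10 ^ (f + 1) := h
        _ = 10 ^ f * 10 := by rw [pow_succ]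
      rw [ih (n / 10) (Nat.digitChar (n % 10) :: ds) hlt]
      simp only [List.foldl_cons]
      have : dstep (n / 10) (Nat.digitChar (n % 10)) = n := by
        simp [dstep, digitChar_toNat hmod]
        omega
      rw [this]

theorem lt_ten_pow_succ (n : Nat) : n < 10 ^ (n + 1) := by
  have h1 : n < 10 ^ n := Nat.lt_pow_self (by norm_num)
  have h2 : 10 ^ n ≤ 10 ^ (n + 1) := Nat.pow_le_pow_right (by norm_num) (Nat.le_succ n)
  omega

theorem toDigits_decv (n : Nat) : decv (Nat.toDigits 10 n) = n := by
  have h := toDigitsCore_decv (n + 1) n [] (lt_ten_pow_succ n)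
  simpa [Nat.toDigits, decv] using h

theorem toChars_nonneg {n : Int} (hn : 0 ≤ n) :
    PySem.Int.toChars n = Nat.toDigits 10 n.toNat := by
  unfold PySem.Int.toChars
  rw [if_neg (by omega)]

theorem toStr_inj_pos {i j : Int} (hi : 1 ≤ i) (hj : 1 ≤ j)
    (h : PySem.Int.toStr i = PySem.Int.toStr j) : i = j := by
  have h2 : PySem.Int.toChars i = PySem.Int.toChars j := by
    rw [← PySem.Int.toList_toStr, ← PySem.Int.toList_toStr, h]
  rw [toChars_nonneg (by omega), toChars_nonneg (by omega)] at h2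
  have h3 : decv (Nat.toDigits 10 i.toNat) = decv (Nat.toDigits 10 j.toNat) := by rw [h2]
  rw [toDigits_decv, toDigits_decv] at h3
  omega

-- ---------- membership in B's ad-id universe ----------
theorem mem_adIds (n : Int) (s : String) :
    s ∈ PySem.Set.ofList ((PySem.List.pyRange 1 (n + 1) 1).map PySem.Int.toStr) ↔
      ∃ i : Int, 1 ≤ i ∧ i ≤ n ∧ s = PySem.Int.toStr i := by
  rw [PySem.Set.mem_ofList]
  simp only [List.mem_map, PySem.List.mem_pyRange_one]
  constructor
  · rintro ⟨i, ⟨h1, h2⟩, rfl⟩; exact ⟨i, h1, by omega, rfl⟩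
  · rintro ⟨i, h1, h2, rfl⟩; exact ⟨i, ⟨h1, by omega⟩, rfl⟩

-- a dedup'd list of stringified ad ids has the length of the matching count over 1..n_ads
theorem len_count (n : Int) (S : List String) (hS : S.Nodup) (q : Int → Bool)
    (hmem : ∀ s, s ∈ S ↔ ∃ i ∈ PySem.List.pyRange 1 (n + 1) 1, q i = true ∧ s = PySem.Int.toStr i) :
    (S.length : Int) = ((PySem.List.pyRange 1 (n + 1) 1).countP q : Nat) := by
  have hperm : S.Perm (((PySem.List.pyRange 1 (n + 1) 1).filter q).map PySem.Int.toStr) := by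
    rw [List.perm_ext_iff_of_nodup hS]
    · intro s
      rw [hmem, List.mem_map]
      constructor
      · rintro ⟨i, hi, hq, rfl⟩; exact ⟨i, List.mem_filter.mpr ⟨hi, hq⟩, rfl⟩
      · rintro ⟨i, hi, rfl⟩
        rw [List.mem_filter] at hi
        exact ⟨i, hi.1, hi.2, rfl⟩
    · apply List.Nodup.map_on
      · intro x hx y hy hxy
        rw [List.mem_filter, PySem.List.mem_pyRange_one] at hx hy
        exact toStr_inj_pos hx.1.1 hy.1.1 hxy
      · exact List.Nodup.filter _ (PySem.List.nodup_pyRange_one _ _)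
  rw [hperm.length_eq, List.length_map, List.countP_eq_length_filter]

-- ---------- A's inner scan as four counts ----------
theorem foldA_aux (mi pi : List String) (l : List Int) (acc : Int × Int × Int × Int) :
    l.foldl (fun acc i =>
      let s := PySem.Int.toStr i
      let inM := mi.contains s
      let inP := pi.contains s
      if !inM && !inP then (acc.1, acc.2.1, acc.2.2.1 + 1, acc.2.2.2)
      else if inM && !inP then (acc.1, acc.2.1, acc.2.2.1, acc.2.2.2 + 1)
      else if !inM && inP then (acc.1, acc.2.1 + 1, acc.2.2.1, acc.2.2.2)
      else (acc.1 + 1, acc.2.1, acc.2.2.1, acc.2.2.2)) acc =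
    (acc.1 + (l.countP (fun i => mi.contains (PySem.Int.toStr i) && pi.contains (PySem.Int.toStr i)) : Int),
     acc.2.1 + (l.countP (fun i => !mi.contains (PySem.Int.toStr i) && pi.contains (PySem.Int.toStr i)) : Int),
     acc.2.2.1 + (l.countP (fun i => !mi.contains (PySem.Int.toStr i) && !pi.contains (PySem.Int.toStr i)) : Int),
     acc.2.2.2 + (l.countP (fun i => mi.contains (PySem.Int.toStr i) && !pi.contains (PySem.Int.toStr i)) : Int)) := by
  induction l generalizing acc with
  | nil => simp
  | cons x l ih =>
    simp only [List.foldl_cons, List.countP_cons]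
    rw [ih]
    cases hm : mi.contains (PySem.Int.toStr x) <;>
      cases hp : pi.contains (PySem.Int.toStr x) <;>
        simp [hm, hp, Prod.mk.injEq] <;> push_cast <;> omega

theorem cmInnerA_counts (mi pi : List String) (n : Int) :
    cmInnerA mi pi n =
      (((PySem.List.pyRange 1 (n + 1) 1).countP (fun i => mi.contains (PySem.Int.toStr i) && pi.contains (PySem.Int.toStr i)) : Int),
       ((PySem.List.pyRange 1 (n + 1) 1).countP (fun i => !mi.contains (PySem.Int.toStr i) && pi.contains (PySem.Int.toStr i)) : Int),
       ((PySem.List.pyRange 1 (n + 1) 1).countP (fun i => !mi.contains (PySem.Int.toStr i) && !pi.contains (PySem.Int.toStr i)) : Int),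
       ((PySem.List.pyRange 1 (n + 1) 1).countP (fun i => mi.contains (PySem.Int.toStr i) && !pi.contains (PySem.Int.toStr i)) : Int)) := by
  unfold cmInnerA
  rw [foldA_aux]
  simp

-- the both-absent count is the complement of the either-present count
theorem countP_not_or (l : List Int) (m p : Int → Bool) :
    l.countP (fun i => !m i && !p i) + l.countP (fun i => m i || p i) = l.length := by
  induction l with
  | nil => simp
  | cons x l ih =>
    simp only [List.countP_cons, List.length_cons]
    cases hm : m x <;> cases hp : p x <;> simp [hm, hp] <;> omega

-- ---------- A's inner scan equals B's set arithmetic ----------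
theorem inner_eq (mi pi : List String) (n : Int) (hn : 0 ≤ n) :
    cmInnerA mi pi n =
      (let adIds : PySem.Set String := PySem.Set.ofList ((PySem.List.pyRange 1 (n + 1) 1).map PySem.Int.toStr)
       let ms := PySem.Set.inter (PySem.Set.ofList mi) adIds
       let ps := PySem.Set.inter (PySem.Set.ofList pi) adIds
       (PySem.Set.len (PySem.Set.inter ms ps),
        PySem.Set.len (PySem.Set.diff ps ms),
        n - PySem.Set.len (PySem.Set.union ms ps),
        PySem.Set.len (PySem.Set.diff ms ps))) := by
  simp only
  set adIds : PySem.Set String := PySem.Set.ofList ((PySem.List.pyRange 1 (n + 1) 1).map PySem.Int.toStr) with hadIds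
  set ms := PySem.Set.inter (PySem.Set.ofList mi) adIds with hms
  set ps := PySem.Set.inter (PySem.Set.ofList pi) adIds with hps
  have hmsnd : ms.Nodup := PySem.Set.nodup_inter _ _ (PySem.Set.nodup_ofList mi)
  have hpsnd : ps.Nodup := PySem.Set.nodup_inter _ _ (PySem.Set.nodup_ofList pi)
  have hmsmem : ∀ s, s ∈ ms ↔ (s ∈ mi ∧ ∃ i : Int, 1 ≤ i ∧ i ≤ n ∧ s = PySem.Int.toStr i) := by
    intro s
    rw [hms, PySem.Set.mem_inter, PySem.Set.mem_ofList, hadIds, mem_adIds]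
  have hpsmem : ∀ s, s ∈ ps ↔ (s ∈ pi ∧ ∃ i : Int, 1 ≤ i ∧ i ≤ n ∧ s = PySem.Int.toStr i) := by
    intro s
    rw [hps, PySem.Set.mem_inter, PySem.Set.mem_ofList, hadIds, mem_adIds]
  have hrange : ∀ i : Int, i ∈ PySem.List.pyRange 1 (n + 1) 1 ↔ 1 ≤ i ∧ i ≤ n := by
    intro i; rw [PySem.List.mem_pyRange_one]; omega
  have ha : PySem.Set.len (PySem.Set.inter ms ps)
      = ((PySem.List.pyRange 1 (n + 1) 1).countP (fun i => mi.contains (PySem.Int.toStr i) && pi.contains (PySem.Int.toStr i)) : Int) := by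
    show ((PySem.Set.inter ms ps).length : Int) = _
    apply len_count n _ (PySem.Set.nodup_inter _ _ hmsnd)
    intro s
    rw [PySem.Set.mem_inter, hmsmem, hpsmem]
    constructor
    · rintro ⟨⟨hm, i, h1, h2, rfl⟩, hp, _⟩
      refine ⟨i, (hrange i).mpr ⟨h1, h2⟩, ?_, rfl⟩
      simp [List.contains_iff_mem, hm, hp]
    · rintro ⟨i, hi, hq, rfl⟩
      rw [hrange] at hi
      simp only [Bool.and_eq_true, List.contains_iff_mem] at hq
      exact ⟨⟨hq.1, i, hi.1, hi.2, rfl⟩, hq.2, i, hi.1, hi.2, rfl⟩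
  have hc : PySem.Set.len (PySem.Set.diff ps ms)
      = ((PySem.List.pyRange 1 (n + 1) 1).countP (fun i => !mi.contains (PySem.Int.toStr i) && pi.contains (PySem.Int.toStr i)) : Int) := by
    show ((PySem.Set.diff ps ms).length : Int) = _
    apply len_count n _ (PySem.Set.nodup_diff _ _ hpsnd)
    intro s
    rw [PySem.Set.mem_diff, hmsmem, hpsmem]
    constructor
    · rintro ⟨⟨hp, i, h1, h2, rfl⟩, hnm⟩
      refine ⟨i, (hrange i).mpr ⟨h1, h2⟩, ?_, rfl⟩
      have : PySem.Int.toStr i ∉ mi := fun hm => hnm ⟨hm, i, h1, h2, rfl⟩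
      simp [List.contains_iff_mem, this, hp]
    · rintro ⟨i, hi, hq, rfl⟩
      rw [hrange] at hi
      simp only [Bool.and_eq_true, Bool.not_eq_true', List.contains_iff_mem,
        List.contains_eq_mem, decide_eq_false_iff_not, decide_eq_true_eq] at hq
      exact ⟨⟨hq.2, i, hi.1, hi.2, rfl⟩, fun hm => hq.1 hm.1⟩
  have hd : PySem.Set.len (PySem.Set.diff ms ps)
      = ((PySem.List.pyRange 1 (n + 1) 1).countP (fun i => mi.contains (PySem.Int.toStr i) && !pi.contains (PySem.Int.toStr i)) : Int) := by
    show ((PySem.Set.diff ms ps).length : Int) = _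
    apply len_count n _ (PySem.Set.nodup_diff _ _ hmsnd)
    intro s
    rw [PySem.Set.mem_diff, hmsmem, hpsmem]
    constructor
    · rintro ⟨⟨hm, i, h1, h2, rfl⟩, hnp⟩
      refine ⟨i, (hrange i).mpr ⟨h1, h2⟩, ?_, rfl⟩
      have : PySem.Int.toStr i ∉ pi := fun hp => hnp ⟨hp, i, h1, h2, rfl⟩
      simp [List.contains_iff_mem, this, hm]
    · rintro ⟨i, hi, hq, rfl⟩
      rw [hrange] at hi
      simp only [Bool.and_eq_true, Bool.not_eq_true', List.contains_iff_mem,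
        List.contains_eq_mem, decide_eq_false_iff_not, decide_eq_true_eq] at hq
      exact ⟨⟨hq.1, i, hi.1, hi.2, rfl⟩, fun hp => hq.2 hp.1⟩
  have hu : PySem.Set.len (PySem.Set.union ms ps)
      = ((PySem.List.pyRange 1 (n + 1) 1).countP (fun i => mi.contains (PySem.Int.toStr i) || pi.contains (PySem.Int.toStr i)) : Int) := by
    show ((PySem.Set.union ms ps).length : Int) = _
    apply len_count n _ (PySem.Set.nodup_union _ _ hmsnd)
    intro s
    rw [PySem.Set.mem_union, hmsmem, hpsmem]
    constructor
    · rintro (⟨hm, i, h1, h2, rfl⟩ | ⟨hp, i, h1, h2, rfl⟩)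
      · exact ⟨i, (hrange i).mpr ⟨h1, h2⟩, by simp [List.contains_iff_mem, hm], rfl⟩
      · exact ⟨i, (hrange i).mpr ⟨h1, h2⟩, by simp [List.contains_iff_mem, hp], rfl⟩
    · rintro ⟨i, hi, hq, rfl⟩
      rw [hrange] at hi
      simp only [Bool.or_eq_true, List.contains_iff_mem] at hq
      rcases hq with hm | hp
      · exact Or.inl ⟨hm, i, hi.1, hi.2, rfl⟩
      · exact Or.inr ⟨hp, i, hi.1, hi.2, rfl⟩
  rw [cmInnerA_counts, ha, hc, hd, Prod.mk.injEq, Prod.mk.injEq, Prod.mk.injEq]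
  refine ⟨rfl, rfl, ?_, rfl⟩
  rw [hu]
  have hpart := countP_not_or (PySem.List.pyRange 1 (n + 1) 1)
    (fun i => mi.contains (PySem.Int.toStr i)) (fun i => pi.contains (PySem.Int.toStr i))
  have hlen : ((PySem.List.pyRange 1 (n + 1) 1).length : Int) = n := by
    rw [PySem.List.length_pyRange_one]
    omega
  have hpart' := congrArg (Nat.cast (R := Int)) hpart
  push_cast at hpart'
  omega

theorem dict_getD_get? (d : List (String × List String)) (k : String) :
    PySem.Dict.getD (⟨d⟩ : PySem.Dict String (List String)) k []
      = (PySem.Dict.get? (⟨d⟩ : PySem.Dict String (List String)) k).getD [] := rfl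

theorem dictAny_get? (d : List (String × List String)) (k : String) :
    (d.any fun p => p.1 == k) = (PySem.Dict.get? (⟨d⟩ : PySem.Dict String (List String)) k).isSome := by
  show _ = (Option.map _ (List.find? _ d)).isSome
  rw [Option.isSome_map, Bool.eq_iff_iff, List.any_eq_true, List.find?_isSome]

-- ===== VERDICT (by name: the statement is the Claim_ definition above) =====
theorem confusion_matrix_micro_spec : Claim_equal_confusion_matrix_micro := by
  intro mapping predictions n_ads n_requests _ hpre
  unfold Spec_confusion_matrix_micro
  unfold confusion_matrix_micro confusion_matrix_micro_alt
  have hfold : ∀ acc : Int × Int × Int × Int, ∀ i ∈ PySem.List.pyRange 1 (n_requests + 1) 1,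
      (fun (acc : Int × Int × Int × Int) i =>
        let r := PySem.Int.toStr i
        let inM := PySem.Dict.contains (⟨mapping⟩ : PySem.Dict String (List String)) r
        let inP := PySem.Dict.contains (⟨predictions⟩ : PySem.Dict String (List String)) r
        if !inM && !inP then
          (acc.1, acc.2.1, acc.2.2.1 + n_ads, acc.2.2.2)
        else if inM && !inP then
          let FN : Int := (PySem.Dict.getD (⟨mapping⟩ : PySem.Dict String (List String)) r []).length
          (acc.1, acc.2.1, acc.2.2.1 + (n_ads - FN), acc.2.2.2 + FN)
        else if !inM && inP then
          let FP : Int := (PySem.Dict.getD (⟨predictions⟩ : PySem.Dict String (List String)) r []).length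
          (acc.1, acc.2.1 + FP, acc.2.2.1 + (n_ads - FP), acc.2.2.2)
        else
          let t := cmInnerA (PySem.Dict.getD (⟨mapping⟩ : PySem.Dict String (List String)) r [])
            (PySem.Dict.getD (⟨predictions⟩ : PySem.Dict String (List String)) r []) n_ads
          (acc.1 + t.1, acc.2.1 + t.2.1, acc.2.2.1 + t.2.2.1, acc.2.2.2 + t.2.2.2)) acc i =
      (fun (acc : Int × Int × Int × Int) i =>
        let r := PySem.Int.toStr i
        match PySem.Dict.get? (⟨mapping⟩ : PySem.Dict String (List String)) r,
          PySem.Dict.get? (⟨predictions⟩ : PySem.Dict String (List String)) r with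
        | none, none => (acc.1, acc.2.1, acc.2.2.1 + n_ads, acc.2.2.2)
        | some m, none => (acc.1, acc.2.1, acc.2.2.1 + (n_ads - m.length), acc.2.2.2 + m.length)
        | none, some p => (acc.1, acc.2.1 + p.length, acc.2.2.1 + (n_ads - p.length), acc.2.2.2)
        | some m, some p =>
          let ms := PySem.Set.inter (PySem.Set.ofList m)
            (PySem.Set.ofList ((PySem.List.pyRange 1 (n_ads + 1) 1).map PySem.Int.toStr))
          let ps := PySem.Set.inter (PySem.Set.ofList p)
            (PySem.Set.ofList ((PySem.List.pyRange 1 (n_ads + 1) 1).map PySem.Int.toStr))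
          (acc.1 + PySem.Set.len (PySem.Set.inter ms ps),
           acc.2.1 + PySem.Set.len (PySem.Set.diff ps ms),
           acc.2.2.1 + (n_ads - PySem.Set.len (PySem.Set.union ms ps)),
           acc.2.2.2 + PySem.Set.len (PySem.Set.diff ms ps))) acc i := by
    intro acc i _
    simp only
    cases hm : PySem.Dict.get? (⟨mapping⟩ : PySem.Dict String (List String)) (PySem.Int.toStr i) with
    | none =>
      have hma : (mapping.any fun p => p.1 == PySem.Int.toStr i) = false := by
        rw [dictAny_get?, hm]; rfl
      cases hp : PySem.Dict.get? (⟨predictions⟩ : PySem.Dict String (List String)) (PySem.Int.toStr i) with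
      | none =>
        have hpa : (predictions.any fun p => p.1 == PySem.Int.toStr i) = false := by
          rw [dictAny_get?, hp]; rfl
        simp [hma, hpa]
      | some p =>
        have hpa : (predictions.any fun p => p.1 == PySem.Int.toStr i) = true := by
          rw [dictAny_get?, hp]; rfl
        simp [hma, hpa, dict_getD_get?, hp]
    | some m =>
      have hma : (mapping.any fun p => p.1 == PySem.Int.toStr i) = true := by
        rw [dictAny_get?, hm]; rfl
      cases hp : PySem.Dict.get? (⟨predictions⟩ : PySem.Dict String (List String)) (PySem.Int.toStr i) with
      | none =>
        have hpa : (predictions.any fun p => p.1 == PySem.Int.toStr i) = false := by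
          rw [dictAny_get?, hp]; rfl
        simp [hma, hpa, dict_getD_get?, hm]
      | some p =>
        have hpa : (predictions.any fun p => p.1 == PySem.Int.toStr i) = true := by
          rw [dictAny_get?, hp]; rfl
        simp [hma, hpa, dict_getD_get?, hm, hp, inner_eq m p n_ads hpre]
  rw [List.foldl_ext _ _ _ hfold]
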